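-- pv_equiv track=rewrite | github.com/Okashanadeem/LearnByFun | Caesar Cipher/caesarCipherDecode.py | alternating_caesar_unshift
-- ===== SOURCE A (Python) =====
-- def alternating_caesar_unshift(text):
--     result = []
--     letter_position = 0
--     i = 0
--     while i < len(text):
--         if text[i] == "@":  # uppercase escape (changed from ^ to @)
--             i += 1
--             if i < len(text):
--                 ch = text[i]
--                 shift = 7 if letter_position % 2 == 0 else 3
--                 letter_position += 1
--                 base = ord('a')
--                 unshifted = chr((ord(ch) - base - shift) % 26 + base)
--                 result.append(unshifted.upper())
--         elif text[i].isalpha():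
--             shift = 7 if letter_position % 2 == 0 else 3
--             letter_position += 1
--             base = ord('a')
--             unshifted = chr((ord(text[i]) - base - shift) % 26 + base)
--             result.append(unshifted)
--         else:
--             result.append(text[i])
--         i += 1
--     return ''.join(result)
-- ===== SOURCE B (Python) =====
-- def _tokens(text):
--     # ('e', ch): escaped char; ('l', ch): plain letter; ('p', ch): literal passthrough
--     toks = []
--     i = 0
--     n = len(text)
--     while i < n:
--         c = text[i]
--         if c == '@':
--             if i + 1 < n:
--                 toks.append(('e', text[i + 1]))
--             i += 2
--         elif c.isalpha():
--             toks.append(('l', c))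
--             i += 1
--         else:
--             toks.append(('p', c))
--             i += 1
--     return toks
--
-- def alternating_caesar_unshift(text):
--     out = []
--     pos = 0
--     for kind, ch in _tokens(text):
--         if kind == 'p':
--             out.append(ch)
--         else:
--             shift = 7 if pos % 2 == 0 else 3
--             pos += 1
--             d = chr((ord(ch) - 97 - shift) % 26 + 97)
--             out.append(d.upper() if kind == 'e' else d)
--     return ''.join(out)
-- ===== Notes on version B (the rewrite author's own statement) =====
-- stated objective: alternative
-- what changed: A's single while-loop juggling the index, escape lookahead, counter and output at once is split into a tokenizer pass (escape/letter/literal tokens) and a separate decode pass over the token list that alone maintains the alternating counter.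
import Mathlib
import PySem

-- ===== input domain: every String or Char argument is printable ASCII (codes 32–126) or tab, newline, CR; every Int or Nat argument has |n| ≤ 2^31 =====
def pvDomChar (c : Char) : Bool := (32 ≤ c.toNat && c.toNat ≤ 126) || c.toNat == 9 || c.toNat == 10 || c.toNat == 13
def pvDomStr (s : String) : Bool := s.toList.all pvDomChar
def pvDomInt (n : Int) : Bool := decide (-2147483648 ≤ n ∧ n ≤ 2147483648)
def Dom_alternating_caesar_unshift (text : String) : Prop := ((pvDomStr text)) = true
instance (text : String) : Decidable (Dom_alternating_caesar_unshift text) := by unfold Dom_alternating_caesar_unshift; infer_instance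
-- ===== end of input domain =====

-- B replaces A's single index-juggling while-loop by a tokenize pass plus a decode pass
-- over the token list (objective: alternative decomposition; same cost, no speed claim).

-- shared arithmetic helpers (the identical expressions appear in both Python sources)
def pvShiftOf (pos : Nat) : Int := if pos % 2 = 0 then 7 else 3
def pvUnshift (ch : Char) (shift : Int) : Char :=
  Char.ofNat ((PySem.Int.mod ((ch.toNat : Int) - 97 - shift) 26 + 97).toNat)

-- ===== PORT A =====
-- A's while loop: i-walk with letter_position and an accumulating result list
def pvGoA : List Char → Nat → List Char → List Char
  | [], _, acc => acc
  | c :: rest, pos, acc =>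
    if c = '@' then
      match rest with
      | [] => acc
      | ch :: rest' =>
        pvGoA rest' (pos + 1) (acc ++ [PySem.Chars.upperChar (pvUnshift ch (pvShiftOf pos))])
    else if PySem.Chars.isalpha c then
      pvGoA rest (pos + 1) (acc ++ [pvUnshift c (pvShiftOf pos)])
    else
      pvGoA rest pos (acc ++ [c])

def alternating_caesar_unshift (text : String) : String :=
  String.mk (pvGoA text.toList 0 [])

-- ===== PORT B =====
inductive PvTok where
  | esc : Char → PvTok
  | letter : Char → PvTok
  | lit : Char → PvTok
deriving DecidableEq, Repr

-- B's _tokens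
def pvTokens : List Char → List PvTok
  | [] => []
  | c :: rest =>
    if c = '@' then
      match rest with
      | [] => []
      | ch :: rest' => PvTok.esc ch :: pvTokens rest'
    else
      (if PySem.Chars.isalpha c then PvTok.letter c else PvTok.lit c) :: pvTokens rest

-- B's decoding for-loop over the tokens
def pvDecode : List PvTok → Nat → List Char
  | [], _ => []
  | PvTok.lit c :: ts, pos => c :: pvDecode ts pos
  | PvTok.letter c :: ts, pos => pvUnshift c (pvShiftOf pos) :: pvDecode ts (pos + 1)
  | PvTok.esc c :: ts, pos =>
      PySem.Chars.upperChar (pvUnshift c (pvShiftOf pos)) :: pvDecode ts (pos + 1)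

def alternating_caesar_unshift_alt (text : String) : String :=
  String.mk (pvDecode (pvTokens text.toList) 0)

-- ===== PRECONDITION & SPEC =====
def Spec_alternating_caesar_unshift (text : String) (out : String) : Prop := out = alternating_caesar_unshift_alt text
instance (text : String) (out : String) : Decidable (Spec_alternating_caesar_unshift text out) := by unfold Spec_alternating_caesar_unshift; infer_instance

-- ===== CLAIM (what is proved, stated in full; the proofs are below) =====
def Claim_equal_alternating_caesar_unshift : Prop := ∀ (text : String), Dom_alternating_caesar_unshift text → Spec_alternating_caesar_unshift text (alternating_caesar_unshift text)

-- ===== LEMMAS AND PROOFS =====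
lemma pvGoA_eq_decode_tokens :
    ∀ (n : Nat) (cs : List Char) (pos : Nat) (acc : List Char), cs.length ≤ n →
      pvGoA cs pos acc = acc ++ pvDecode (pvTokens cs) pos := by
  intro n
  induction n with
  | zero =>
    intro cs pos acc h
    have : cs = [] := List.eq_nil_of_length_eq_zero (Nat.le_zero.mp h)
    subst this
    simp [pvGoA, pvTokens, pvDecode]
  | succ n ih =>
    intro cs pos acc h
    match cs with
    | [] => simp [pvGoA, pvTokens, pvDecode]
    | c :: rest =>
      rw [pvGoA.eq_def, pvTokens.eq_def]
      dsimp only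
      by_cases hc : c = '@'
      · rw [if_pos hc, if_pos hc]
        cases rest with
        | nil => simp [pvDecode]
        | cons ch rest' =>
          have hlen : rest'.length ≤ n := by
            simp only [List.length_cons] at h; omega
          dsimp only
          rw [ih rest' (pos + 1) _ hlen]
          simp [pvDecode]
      · rw [if_neg hc, if_neg hc]
        have hlen : rest.length ≤ n := by
          simp only [List.length_cons] at h; omega
        by_cases ha : PySem.Chars.isalpha c = true
        · rw [if_pos ha, if_pos ha, ih rest (pos + 1) _ hlen]
          simp [pvDecode]
        · rw [if_neg ha, if_neg ha, ih rest pos _ hlen]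
          simp [pvDecode]

-- ===== VERDICT (by name: the statement is the Claim_ definition above) =====
theorem alternating_caesar_unshift_spec : Claim_equal_alternating_caesar_unshift := by
  intro text _
  unfold Spec_alternating_caesar_unshift alternating_caesar_unshift alternating_caesar_unshift_alt
  rw [pvGoA_eq_decode_tokens text.toList.length text.toList 0 [] (le_refl _), List.nil_append]
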